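-- pv_equiv track=rewrite | github.com/Sirorezka/ZeroEval | src/config_utils.py | get_shards_split
-- ===== SOURCE A (Python) =====
-- from typing import List, Tuple
--
-- def get_shards_split(n_prompts: int, n_shards: int | None = None) -> List[Tuple[int,int]]:
--     """ More honest way to split prompts into shards.
--     """
--
--     if n_shards is None or n_shards == 1:
--         return [(0, n_prompts)]
--
--     shards_locs = []
--     shard_size, rem = divmod(n_prompts, n_shards)
--     prev = 0
--     for i in range(n_shards):
--         if i<rem:
--             cur_size = shard_size+1
--         else:
--             cur_size = shard_size
--
--         shards_locs.append((prev, prev+cur_size))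
--         prev += cur_size
--
--     return shards_locs
-- ===== SOURCE B (Python) =====
-- from typing import List, Tuple
--
-- def get_shards_split(n_prompts: int, n_shards: int | None = None) -> List[Tuple[int, int]]:
--     """Split n_prompts into n_shards index ranges via a staged boundary list."""
--     if n_shards is None:
--         return [(0, n_prompts)]
--     q, rem = divmod(n_prompts, n_shards)
--     bounds = [i * q + min(i, rem) for i in range(n_shards + 1)]
--     return list(zip(bounds, bounds[1:]))
-- ===== Notes on version B (the rewrite author's own statement) =====
-- stated objective: alternative
-- what changed: Replaces the accumulator-threaded loop (prev carried across iterations) by two staged passes: first a boundary list via the closed form i*q + min(i, rem) over range(n_shards+1), then zipping consecutive boundaries into ranges; the n_shards==1 special case is dropped since the closed form covers it.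
import Mathlib
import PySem

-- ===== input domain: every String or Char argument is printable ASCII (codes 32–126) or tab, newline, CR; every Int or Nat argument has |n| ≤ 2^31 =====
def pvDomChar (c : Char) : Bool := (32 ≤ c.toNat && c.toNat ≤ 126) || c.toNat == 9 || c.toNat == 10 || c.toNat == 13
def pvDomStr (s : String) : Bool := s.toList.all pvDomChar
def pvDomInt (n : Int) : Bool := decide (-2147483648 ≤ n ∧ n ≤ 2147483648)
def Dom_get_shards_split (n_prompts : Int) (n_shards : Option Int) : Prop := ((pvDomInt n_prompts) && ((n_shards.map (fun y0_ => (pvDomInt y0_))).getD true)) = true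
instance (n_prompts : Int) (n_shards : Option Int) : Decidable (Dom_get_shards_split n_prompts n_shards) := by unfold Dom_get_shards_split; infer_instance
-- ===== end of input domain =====

-- B replaces A's accumulator-threaded loop by two staged passes: a closed-form
-- boundary list, then zipping consecutive boundaries (objective: alternative).

-- ===== PORT A =====
def get_shards_split (n_prompts : Int) (n_shards : Option Int) : List (Int × Int) :=
  match n_shards with
  | none => [(0, n_prompts)]
  | some n =>
    if n = 1 then [(0, n_prompts)]
    else
      let shard_size := PySem.Int.floordiv n_prompts n
      let rem := PySem.Int.mod n_prompts n
      let res := (PySem.List.pyRange 0 n 1).foldl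
        (fun (st : List (Int × Int) × Int) i =>
          let cur_size := if i < rem then shard_size + 1 else shard_size
          (st.1 ++ [(st.2, st.2 + cur_size)], st.2 + cur_size)) ([], 0)
      res.1

-- ===== PORT B =====
def get_shards_split_alt (n_prompts : Int) (n_shards : Option Int) : List (Int × Int) :=
  match n_shards with
  | none => [(0, n_prompts)]
  | some n =>
    let q := PySem.Int.floordiv n_prompts n
    let rem := PySem.Int.mod n_prompts n
    let bounds := (PySem.List.pyRange 0 (n + 1) 1).map (fun i => i * q + min i rem)
    bounds.zip bounds.tail

-- ===== PRECONDITION & SPEC =====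
-- Pre_ excludes only n_shards == 0, where Python's divmod raises ZeroDivisionError (in A and in B alike).
def Pre_get_shards_split (n_prompts : Int) (n_shards : Option Int) : Prop := n_shards ≠ some 0
instance (n_prompts : Int) (n_shards : Option Int) : Decidable (Pre_get_shards_split n_prompts n_shards) := by unfold Pre_get_shards_split; infer_instance
def pvWitness_get_shards_split : Int × Option Int := (7, some 3)

def Spec_get_shards_split (n_prompts : Int) (n_shards : Option Int) (out : List (Int × Int)) : Prop := out = get_shards_split_alt n_prompts n_shards
instance (n_prompts : Int) (n_shards : Option Int) (out : List (Int × Int)) : Decidable (Spec_get_shards_split n_prompts n_shards out) := by unfold Spec_get_shards_split; infer_instance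

-- ===== CLAIM (what is proved, stated in full; the proofs are below) =====
def Claim_equal_get_shards_split : Prop := ∀ (n_prompts : Int) (n_shards : Option Int), Dom_get_shards_split n_prompts n_shards → Pre_get_shards_split n_prompts n_shards → Spec_get_shards_split n_prompts n_shards (get_shards_split n_prompts n_shards)

-- ===== LEMMAS AND PROOFS =====

-- Loop invariant for A: after folding over range(m), the accumulator holds the
-- consecutive closed-form pairs and prev = m*q + min m rem (needs 0 ≤ rem).
theorem pv_fold_aux (q rem : Int) (hrem : 0 ≤ rem) (m : Nat) :
    (PySem.List.pyRange 0 (m : Int) 1).foldl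
      (fun (st : List (Int × Int) × Int) i =>
        (st.1 ++ [(st.2, st.2 + (if i < rem then q + 1 else q))],
         st.2 + (if i < rem then q + 1 else q))) ([], 0)
    = ((PySem.List.pyRange 0 (m : Int) 1).map
        (fun i => (i * q + min i rem, (i + 1) * q + min (i + 1) rem)),
       (m : Int) * q + min (m : Int) rem) := by
  induction m with
  | zero => simp [PySem.List.pyRange_one_eq_nil (by norm_num : (0:Int) ≤ 0)]; omega
  | succ k ih =>
    have h : PySem.List.pyRange 0 ((k:Int)+1) 1
        = PySem.List.pyRange 0 (k:Int) 1 ++ [(k:Int)] :=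
      PySem.List.pyRange_one_succ_right (by positivity)
    push_cast
    rw [h, List.foldl_append, List.map_append, ih]
    have hq : ((k : Int) + 1) * q = (k : Int) * q + q := by ring
    simp only [List.foldl_cons, List.foldl_nil, List.map_cons, List.map_nil,
      Prod.mk.injEq, List.append_cancel_left_eq, List.cons.injEq, and_true,
      true_and, hq]
    constructor <;> split_ifs <;> omega

-- Zipping a boundary list with its tail yields the consecutive pairs.
theorem pv_zip_consec {α : Type} (f : Int → α) (m : Nat) : ∀ (a : Int),
    (((PySem.List.pyRange a (a + m + 1) 1).map f).zip
      ((PySem.List.pyRange a (a + m + 1) 1).map f).tail)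
    = (PySem.List.pyRange a (a + m) 1).map (fun i => (f i, f (i + 1))) := by
  induction m with
  | zero =>
    intro a
    simp [PySem.List.pyRange_one_singleton a]
  | succ k ih =>
    intro a
    have b1 : a < a + (((k:Nat)+1:Nat):Int) + 1 := by push_cast; omega
    have b2 : a + 1 < a + (((k:Nat)+1:Nat):Int) + 1 := by push_cast; omega
    have b3 : a < a + (((k:Nat)+1:Nat):Int) := by push_cast; omega
    have c1 := PySem.List.pyRange_one_cons b1
    have c2 := PySem.List.pyRange_one_cons b2
    have c3 := PySem.List.pyRange_one_cons b3
    have e1 : a + (((k:Nat)+1:Nat):Int) + 1 = (a+1) + (k:Nat) + 1 := by push_cast; ring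
    have e2 : a + (((k:Nat)+1:Nat):Int) = (a+1) + (k:Nat) := by push_cast; ring
    have ihx := ih (a+1)
    rw [e1] at c1 c2
    rw [e2] at c3
    rw [e1, e2, c1, c3, c2]
    rw [c2] at ihx
    simp only [List.map_cons, List.tail_cons, List.zip_cons_cons] at ihx ⊢
    rw [ihx]

-- B's general path reduces to the map of consecutive closed-form pairs.
theorem pv_alt_eq_pairs (n_prompts : Int) (m : Nat) :
    get_shards_split_alt n_prompts (some (m : Int))
      = (PySem.List.pyRange 0 (m : Int) 1).map
          (fun i => (i * (PySem.Int.floordiv n_prompts m) + min i (PySem.Int.mod n_prompts m),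
                     (i + 1) * (PySem.Int.floordiv n_prompts m) + min (i + 1) (PySem.Int.mod n_prompts m))) := by
  simp only [get_shards_split_alt]
  have e : (m:Int) + 1 = 0 + (m:Int) + 1 := by ring
  rw [e, pv_zip_consec _ m 0]
  norm_num

theorem get_shards_split_spec' (n_prompts : Int) (n_shards : Option Int)
    (hpre : Pre_get_shards_split n_prompts n_shards) :
    get_shards_split n_prompts n_shards = get_shards_split_alt n_prompts n_shards := by
  match n_shards with
  | none => rfl
  | some n =>
    have hn0 : n ≠ 0 := fun h => hpre (by simp [h])
    by_cases hpos : 0 < n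
    · obtain ⟨m, hm⟩ : ∃ m : Nat, n = (m : Int) := ⟨n.toNat, by omega⟩
      subst hm
      have hrem : 0 ≤ PySem.Int.mod n_prompts m := by
        rw [PySem.Int.mod_eq_emod_of_pos hpos]
        exact Int.emod_nonneg _ hn0
      by_cases h1 : (m : Int) = 1
      · have hm1 : m = 1 := by exact_mod_cast h1
        subst hm1
        have hpr : PySem.List.pyRange 0 1 1 = [0] := by decide
        rw [pv_alt_eq_pairs n_prompts 1]
        simp [get_shards_split, hpr]
      · simp only [get_shards_split, h1, if_false]
        rw [pv_fold_aux (PySem.Int.floordiv n_prompts m) (PySem.Int.mod n_prompts m) hrem m,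
            pv_alt_eq_pairs n_prompts m]
    · have h1 : n ≠ 1 := by omega
      have hA : PySem.List.pyRange 0 n 1 = [] :=
        PySem.List.pyRange_one_eq_nil (by omega)
      have hB : PySem.List.pyRange 0 (n + 1) 1 = [] :=
        PySem.List.pyRange_one_eq_nil (by omega)
      simp [get_shards_split, get_shards_split_alt, hA, hB, h1]

-- ===== VERDICT (by name: the statement is the Claim_ definition above) =====
theorem get_shards_split_spec : Claim_equal_get_shards_split := by
  intro np ns _ hpre
  exact get_shards_split_spec' np ns hpre
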